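-- pv_equiv track=rewrite | github.com/obscurebit/bits | scripts/book_render.py | excerpt
-- ===== SOURCE A (Python) =====
-- def excerpt(text: str, words: int) -> str:
--     clean = []
--     for line in text.splitlines():
--         stripped = line.strip()
--         if not stripped or stripped.startswith("#"):
--             continue
--         clean.append(stripped)
--     tokens = " ".join(clean).split()
--     if len(tokens) <= words:
--         return " ".join(tokens)
--     return " ".join(tokens[:words]).rstrip() + "..."
-- ===== SOURCE B (Python) =====
-- def excerpt(text: str, words: int) -> str:
--     # Single character-level scanner: no strip/split/join-resplit pipeline.
--     tokens = []
--     for line in text.splitlines():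
--         cur = []
--         comment = False
--         seen = False
--         for ch in line:
--             if ch == " " or ch == "\t":
--                 if cur and not comment:
--                     tokens.append("".join(cur))
--                 cur = []
--             elif not seen:
--                 seen = True
--                 comment = ch == "#"
--                 cur.append(ch)
--             else:
--                 cur.append(ch)
--         if cur and not comment:
--             tokens.append("".join(cur))
--     if len(tokens) <= words:
--         return " ".join(tokens)
--     return " ".join(tokens[:words]) + "..."
-- ===== Notes on version B (the rewrite author's own statement) =====
-- stated objective: alternative
-- what changed: B replaces A's library pipeline (strip each line, filter, join the kept lines, re-split the joined string, rstrip the truncated join) with a hand-rolled character-level scanner that walks each line once, tracking a comment flag and the current word buffer, and emits words directly; the rstrip is dropped as provably redundant.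
import Mathlib
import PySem

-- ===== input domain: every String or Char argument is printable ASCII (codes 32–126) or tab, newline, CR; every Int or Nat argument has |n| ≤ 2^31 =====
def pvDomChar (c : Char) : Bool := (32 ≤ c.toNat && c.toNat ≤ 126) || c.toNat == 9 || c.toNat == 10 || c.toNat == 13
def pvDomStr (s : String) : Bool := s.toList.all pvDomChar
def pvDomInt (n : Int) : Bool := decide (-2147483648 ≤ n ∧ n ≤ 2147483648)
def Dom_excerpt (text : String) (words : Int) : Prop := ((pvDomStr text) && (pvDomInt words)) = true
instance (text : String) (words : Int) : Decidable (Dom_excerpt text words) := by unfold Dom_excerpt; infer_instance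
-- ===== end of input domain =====

-- B replaces A's strip/filter/join/re-split pipeline by a character-level scanner over each line
-- (comment flag + current word buffer) and drops the redundant rstrip (objective: alternative).

-- ===== PORT A =====
def excerpt (text : String) (words : Int) : String :=
  let clean := (PySem.Str.splitlines text).foldl
    (fun acc line =>
      let stripped := PySem.Str.strip line
      if stripped = "" ∨ PySem.Str.startswith stripped "#" = true then acc
      else acc ++ [stripped]) []
  let tokens := PySem.Str.split₀ (PySem.Str.join " " clean)
  if (tokens.length : Int) ≤ words then PySem.Str.join " " tokens
  else PySem.Str.rstrip (PySem.Str.join " " (PySem.List.slice tokens none (some words))) ++ "..."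

-- ===== PORT B =====
-- B-side helper: the body of Source B's inner per-character loop (state = (tokens, cur, comment, seen))
def pvStep (s : List String × List Char × Bool × Bool) (ch : Char) :
    List String × List Char × Bool × Bool :=
  let toks := s.1
  let cur := s.2.1
  let comment := s.2.2.1
  let seen := s.2.2.2
  if ch = ' ' ∨ ch = '\t' then
    (if cur ≠ [] ∧ comment = false then toks ++ [String.ofList cur] else toks, [], comment, seen)
  else if seen = false then (toks, cur ++ [ch], ch = '#', true)
  else (toks, cur ++ [ch], comment, seen)

def excerpt_alt (text : String) (words : Int) : String :=
  let tokens := (PySem.Str.splitlines text).foldl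
    (fun toks line =>
      let st := line.toList.foldl pvStep (toks, [], false, false)
      if st.2.1 ≠ [] ∧ st.2.2.1 = false then st.1 ++ [String.ofList st.2.1] else st.1) []
  if (tokens.length : Int) ≤ words then PySem.Str.join " " tokens
  else PySem.Str.join " " (PySem.List.slice tokens none (some words)) ++ "..."

-- ===== PRECONDITION & SPEC =====
def Spec_excerpt (text : String) (words : Int) (out : String) : Prop := out = excerpt_alt text words
instance (text : String) (words : Int) (out : String) : Decidable (Spec_excerpt text words out) := by unfold Spec_excerpt; infer_instance

-- ===== CLAIM (what is proved, stated in full; the proofs are below) =====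
def Claim_equal_excerpt : Prop := ∀ (text : String) (words : Int), Dom_excerpt text words → Spec_excerpt text words (excerpt text words)

-- ===== LEMMAS AND PROOFS =====

-- ---------- A-side: join-with-space then re-split = concatenation of per-line splits ----------

-- split₀.go with a non-empty accumulator just prepends it (reversed).
theorem pv_go_acc (s cur : List Char) (acc : List (List Char)) :
    PySem.Chars.split₀.go s cur acc = acc.reverse ++ PySem.Chars.split₀.go s cur [] := by
  induction s generalizing cur acc with
  | nil => simp [PySem.Chars.split₀.go]; split_ifs <;> simp
  | cons c s ih =>
    simp only [PySem.Chars.split₀.go]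
    split_ifs with h1 h2
    · exact ih [] acc
    · rw [ih [] (cur.reverse :: acc), ih [] [cur.reverse]]; simp
    · exact ih (c :: cur) acc

-- a space splits split₀.go cleanly
theorem pv_go_space (b : List Char) : ∀ (a cur : List Char),
    PySem.Chars.split₀.go (a ++ ' ' :: b) cur [] =
      PySem.Chars.split₀.go a cur [] ++ PySem.Chars.split₀.go b [] [] := by
  intro a
  induction a with
  | nil =>
    intro cur
    simp only [List.nil_append, PySem.Chars.split₀.go]
    have hsp : PySem.Chars.isspace ' ' = true := by decide
    rw [if_pos hsp]
    split_ifs with h <;> simp [pv_go_acc b [] [cur.reverse]]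
  | cons c a ih =>
    intro cur
    simp only [List.cons_append, PySem.Chars.split₀.go]
    split_ifs with h1 h2
    · exact ih []
    · rw [pv_go_acc (a ++ ' ' :: b) [] [cur.reverse], pv_go_acc a [] [cur.reverse], ih []]
      simp
    · exact ih (c :: cur)

theorem pv_split_space (a b : List Char) :
    PySem.Chars.split₀ (a ++ ' ' :: b) = PySem.Chars.split₀ a ++ PySem.Chars.split₀ b := by
  simp only [PySem.Chars.split₀]; exact pv_go_space b a []

-- join with a single space then split = concatenation of the splits
theorem pv_join_split (ps : List (List Char)) :
    PySem.Chars.split₀ (PySem.Chars.join [' '] ps) = ps.flatMap PySem.Chars.split₀ := by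
  induction ps with
  | nil => rfl
  | cons p ps ih =>
    cases ps with
    | nil => simp [PySem.Chars.join, List.intercalate]
    | cons q r =>
      rw [PySem.Chars.join_cons_cons]
      have : p ++ [' '] ++ PySem.Chars.join [' '] (q :: r)
           = p ++ ' ' :: PySem.Chars.join [' '] (q :: r) := by simp
      rw [this, pv_split_space, ih]
      simp

theorem pv_str_join_split (parts : List String) :
    PySem.Str.split₀ (PySem.Str.join " " parts) = parts.flatMap PySem.Str.split₀ := by
  simp only [PySem.Str.split₀, PySem.Str.toList_join]
  have h : (" " : String).toList = [' '] := rfl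
  rw [h, pv_join_split, List.flatMap_map, List.map_flatMap]
  rfl

-- ---------- tokens are non-empty and space-free; rstrip on their join is a no-op ----------

theorem pv_go_good (s : List Char) : ∀ (cur : List Char) (acc : List (List Char)),
    (∀ c ∈ cur, PySem.Chars.isspace c = false) →
    (∀ t ∈ acc, t ≠ [] ∧ ∀ c ∈ t, PySem.Chars.isspace c = false) →
    ∀ t ∈ PySem.Chars.split₀.go s cur acc, t ≠ [] ∧ ∀ c ∈ t, PySem.Chars.isspace c = false := by
  induction s with
  | nil =>
    intro cur acc hcur hacc t ht
    simp only [PySem.Chars.split₀.go] at ht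
    split_ifs at ht with h
    · exact hacc t (List.mem_reverse.mp ht)
    · rw [List.mem_reverse, List.mem_cons] at ht
      rcases ht with h1 | h1
      · subst h1
        refine ⟨by simpa [List.isEmpty_iff] using h, ?_⟩
        intro c hc; exact hcur c (List.mem_reverse.mp hc)
      · exact hacc t h1
  | cons c s ih =>
    intro cur acc hcur hacc t ht
    simp only [PySem.Chars.split₀.go] at ht
    split_ifs at ht with h1 h2
    · exact ih [] acc (by simp) hacc t ht
    · refine ih [] (cur.reverse :: acc) (by simp) ?_ t ht
      intro u hu
      rcases List.mem_cons.mp hu with h3 | h3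
      · subst h3
        refine ⟨by simpa [List.isEmpty_iff] using h2, ?_⟩
        intro d hd; exact hcur d (List.mem_reverse.mp hd)
      · exact hacc u h3
    · refine ih (c :: cur) acc ?_ hacc t ht
      intro d hd
      rcases List.mem_cons.mp hd with h3 | h3
      · subst h3; simpa using h1
      · exact hcur d h3

theorem pv_tok_good (s : List Char) :
    ∀ t ∈ PySem.Chars.split₀ s, t ≠ [] ∧ ∀ c ∈ t, PySem.Chars.isspace c = false :=
  pv_go_good s [] [] (by simp) (by simp)

-- rstrip is the identity when the last character is not a space
theorem pv_rstrip_eq_self (s : List Char)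
    (h : ∀ c, s.getLast? = some c → PySem.Chars.isspace c = false) :
    PySem.Chars.rstrip s = s := by
  unfold PySem.Chars.rstrip
  cases hrev : s.reverse with
  | nil => simpa using congrArg List.reverse hrev
  | cons c r =>
    have hc : s.getLast? = some c := by
      rw [List.getLast?_eq_head?_reverse, hrev]; rfl
    rw [List.dropWhile_cons_of_neg (by simp [h c hc]), ← hrev, List.reverse_reverse]

-- a space-joined list of non-empty space-free tokens ends in a non-space character
theorem pv_join_last (ts : List (List Char)) (hne : ts ≠ [])
    (h : ∀ t ∈ ts, t ≠ [] ∧ ∀ c ∈ t, PySem.Chars.isspace c = false) :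
    ∃ c, (PySem.Chars.join [' '] ts).getLast? = some c ∧ PySem.Chars.isspace c = false := by
  induction ts with
  | nil => exact absurd rfl hne
  | cons t ts ih =>
    cases ts with
    | nil =>
      have ht := h t (by simp)
      obtain ⟨c, hc⟩ := List.getLast?_isSome.mpr ht.1 |> Option.isSome_iff_exists.mp
      exact ⟨c, by simpa [PySem.Chars.join, List.intercalate] using hc,
             ht.2 c (List.mem_of_getLast? hc)⟩
    | cons q r =>
      obtain ⟨c, hc1, hc2⟩ := ih (by simp) (fun u hu => h u (List.mem_cons_of_mem t hu))
      have hj : PySem.Chars.join [' '] (q :: r) ≠ [] := by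
        intro hnil; rw [hnil] at hc1; simp at hc1
      refine ⟨c, ?_, hc2⟩
      rw [PySem.Chars.join_cons_cons, List.append_assoc,
          List.getLast?_append_of_ne_nil _ (by simp),
          List.getLast?_append_of_ne_nil _ hj, hc1]

theorem pv_rstrip_join (ts : List (List Char))
    (h : ∀ t ∈ ts, t ≠ [] ∧ ∀ c ∈ t, PySem.Chars.isspace c = false) :
    PySem.Chars.rstrip (PySem.Chars.join [' '] ts) = PySem.Chars.join [' '] ts := by
  cases hts : ts with
  | nil => rfl
  | cons t r =>
    apply pv_rstrip_eq_self
    intro c hc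
    obtain ⟨d, hd1, hd2⟩ := pv_join_last (t :: r) (by simp) (hts ▸ h)
    rw [hd1] at hc
    injection hc with hcd
    exact hcd ▸ hd2

theorem pv_str_rstrip_join (ts : List String)
    (h : ∀ t ∈ ts, t.toList ≠ [] ∧ ∀ c ∈ t.toList, PySem.Chars.isspace c = false) :
    PySem.Str.rstrip (PySem.Str.join " " ts) = PySem.Str.join " " ts := by
  apply String.toList_inj.mp
  rw [PySem.Str.toList_rstrip, PySem.Str.toList_join]
  have hsep : (" " : String).toList = [' '] := rfl
  rw [hsep]
  apply pv_rstrip_join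
  intro t ht
  obtain ⟨u, hu, rfl⟩ := List.mem_map.mp ht
  exact h u hu

theorem pv_str_tok_good (s : String) :
    ∀ t ∈ PySem.Str.split₀ s, t.toList ≠ [] ∧ ∀ c ∈ t.toList, PySem.Chars.isspace c = false := by
  intro t ht
  have hmem : t.toList ∈ PySem.Chars.split₀ s.toList := by
    rw [← PySem.Str.split₀_map_toList]
    exact List.mem_map_of_mem ht
  exact pv_tok_good s.toList t.toList hmem

-- ---------- strip / split₀ facts about leading and trailing whitespace ----------

theorem pv_strip_cons_ws (c : Char) (l : List Char) (h : PySem.Chars.isspace c = true) :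
    PySem.Chars.strip (c :: l) = PySem.Chars.strip l := by
  simp [PySem.Chars.strip, PySem.Chars.lstrip, List.dropWhile_cons_of_pos h]

theorem pv_rstrip_cons (c : Char) (l : List Char) (h : PySem.Chars.isspace c = false) :
    PySem.Chars.rstrip (c :: l) = c :: PySem.Chars.rstrip l := by
  unfold PySem.Chars.rstrip
  rw [show (c :: l).reverse = l.reverse ++ [c] by simp, List.dropWhile_append]
  split_ifs with he
  · rw [List.isEmpty_iff] at he
    rw [he, List.dropWhile_cons_of_neg (by simp [h])]
    simp
  · simp

theorem pv_strip_cons_nonws (c : Char) (l : List Char) (h : PySem.Chars.isspace c = false) :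
    PySem.Chars.strip (c :: l) = c :: PySem.Chars.rstrip l := by
  simp only [PySem.Chars.strip, PySem.Chars.lstrip]
  rw [List.dropWhile_cons_of_neg (by simp [h]), pv_rstrip_cons c l h]

theorem pv_ws_suffix (l : List Char) :
    ∃ t, l = PySem.Chars.rstrip l ++ t ∧ ∀ c ∈ t, PySem.Chars.isspace c = true := by
  refine ⟨(l.reverse.takeWhile PySem.Chars.isspace).reverse, ?_, ?_⟩
  · unfold PySem.Chars.rstrip
    rw [← List.reverse_append, List.takeWhile_append_dropWhile, List.reverse_reverse]
  · intro c hc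
    exact List.mem_takeWhile_imp (List.mem_reverse.mp hc)

-- trailing whitespace does not change split₀.go
theorem pv_go_ws (t : List Char) (ht : ∀ c ∈ t, PySem.Chars.isspace c = true) :
    ∀ cur acc, PySem.Chars.split₀.go t cur acc = PySem.Chars.split₀.go [] cur acc := by
  induction t with
  | nil => intro cur acc; rfl
  | cons c t ih =>
    intro cur acc
    have hc : PySem.Chars.isspace c = true := ht c (by simp)
    have ht' : ∀ c ∈ t, PySem.Chars.isspace c = true := fun d hd => ht d (by simp [hd])
    simp only [PySem.Chars.split₀.go, hc, if_true]
    split_ifs with h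
    · rw [ih ht']
      simp only [PySem.Chars.split₀.go]
      rw [List.isEmpty_iff] at h
      simp [h]
    · rw [ih ht']
      simp only [PySem.Chars.split₀.go]
      simp [List.isEmpty_iff] at h ⊢

theorem pv_go_append_ws (t : List Char) (ht : ∀ c ∈ t, PySem.Chars.isspace c = true) :
    ∀ a cur acc, PySem.Chars.split₀.go (a ++ t) cur acc = PySem.Chars.split₀.go a cur acc := by
  intro a
  induction a with
  | nil =>
    intro cur acc
    simpa using pv_go_ws t ht cur acc
  | cons c a ih =>
    intro cur acc
    simp only [List.cons_append, PySem.Chars.split₀.go]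
    split_ifs <;> simp [ih]

theorem pv_go_rstrip (l : List Char) (cur : List Char) (acc : List (List Char)) :
    PySem.Chars.split₀.go (PySem.Chars.rstrip l) cur acc = PySem.Chars.split₀.go l cur acc := by
  obtain ⟨t, hl, ht⟩ := pv_ws_suffix l
  conv_rhs => rw [hl]
  rw [pv_go_append_ws t ht]

-- ---------- every char of every splitlines line is a non-break char of the text ----------

-- the line-break predicate used inside PySem.Chars.splitlines (definitionally equal)
def pvIsB (c : Char) : Bool :=
  decide (c.toNat = 10) || decide (c.toNat = 13) || decide (c.toNat = 11) ||
  decide (c.toNat = 12) || decide (c.toNat = 28) || decide (c.toNat = 29) ||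
  decide (c.toNat = 30) || decide (c.toNat = 133) || decide (c.toNat = 8232) ||
  decide (c.toNat = 8233)

theorem pv_splitlines_eq (s : List Char) :
    PySem.Chars.splitlines s = PySem.Chars.splitlines.go pvIsB s [] [] := rfl

theorem pv_sl_go_mem (isB : Char → Bool) (P : Char → Prop) :
    ∀ (n : Nat) (s : List Char), s.length ≤ n → ∀ (cur : List Char) (acc : List (List Char)),
    (∀ c ∈ cur, P c) → (∀ l ∈ acc, ∀ c ∈ l, P c) → (∀ c ∈ s, isB c = false → P c) →
    ∀ l ∈ PySem.Chars.splitlines.go isB s cur acc, ∀ c ∈ l, P c := by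
  intro n
  induction n with
  | zero =>
    intro s hs cur acc hcur hacc _ l hl c hc
    have hnil : s = [] := List.length_eq_zero_iff.mp (Nat.le_zero.mp hs)
    subst hnil
    rw [PySem.Chars.splitlines.go.eq_def] at hl
    simp only at hl
    split_ifs at hl with h
    · exact hacc l (List.mem_reverse.mp hl) c hc
    · rw [List.mem_reverse, List.mem_cons] at hl
      rcases hl with h1 | h1
      · subst h1; exact hcur c (List.mem_reverse.mp hc)
      · exact hacc l h1 c hc
  | succ n ih =>
    intro s hs cur acc hcur hacc hP l hl c hc
    rw [PySem.Chars.splitlines.go.eq_def] at hl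
    split at hl
    case h_1 =>
      split_ifs at hl with h
      · exact hacc l (List.mem_reverse.mp hl) c hc
      · rw [List.mem_reverse, List.mem_cons] at hl
        rcases hl with h1 | h1
        · subst h1; exact hcur c (List.mem_reverse.mp hc)
        · exact hacc l h1 c hc
    case h_2 =>
      rename_i rest
      refine ih rest (by simp at hs; omega) [] (cur.reverse :: acc) (by simp) ?_
        (fun d hd hb => hP d (by simp [hd]) hb) l hl c hc
      intro u hu
      rcases List.mem_cons.mp hu with h1 | h1
      · subst h1; intro d hd; exact hcur d (List.mem_reverse.mp hd)
      · exact hacc u h1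
    case h_3 =>
      rename_i a rest hne
      split_ifs at hl with hb
      · refine ih rest (by simp at hs; omega) [] (cur.reverse :: acc) (by simp) ?_
          (fun d hd hb' => hP d (by simp [hd]) hb') l hl c hc
        intro u hu
        rcases List.mem_cons.mp hu with h1 | h1
        · subst h1; intro d hd; exact hcur d (List.mem_reverse.mp hd)
        · exact hacc u h1
      · refine ih rest (by simp at hs; omega) (a :: cur) acc ?_ hacc
          (fun d hd hb' => hP d (by simp [hd]) hb') l hl c hc
        intro d hd
        rcases List.mem_cons.mp hd with h1 | h1
        · subst h1; exact hP d (by simp) (by simpa using hb)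
        · exact hcur d h1

-- ---------- the character classification used by the scanner ----------

theorem pv_char_class (c : Char) (hd : pvDomChar c = true) (hb : pvIsB c = false) :
    (PySem.Chars.isspace c = true ↔ (c = ' ' ∨ c = '\t')) := by
  constructor
  · intro h
    have hn : c.toNat = 32 ∨ c.toNat = 9 := by
      simp only [PySem.Chars.isspace, pvDomChar, pvIsB] at h hd hb
      simp only [Bool.or_eq_true, Bool.and_eq_true, decide_eq_true_eq, beq_iff_eq,
        Bool.or_eq_false_iff, decide_eq_false_iff_not] at h hd hb
      omega
    rcases hn with hn | hn
    · left
      rw [← Char.ofNat_toNat c, hn]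
    · right
      rw [← Char.ofNat_toNat c, hn]
  · rintro (rfl | rfl) <;> decide

theorem pv_line_chars (text : String) (hdom : pvDomStr text = true) :
    ∀ line ∈ PySem.Str.splitlines text, ∀ c ∈ line.toList,
      (PySem.Chars.isspace c = true ↔ (c = ' ' ∨ c = '\t')) := by
  intro line hline c hc
  have hmem : line.toList ∈ PySem.Chars.splitlines text.toList := by
    rw [← PySem.Str.splitlines_map_toList]
    exact List.mem_map_of_mem hline
  rw [pv_splitlines_eq] at hmem
  refine pv_sl_go_mem pvIsB (fun c => (PySem.Chars.isspace c = true ↔ (c = ' ' ∨ c = '\t')))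
    text.toList.length text.toList le_rfl [] [] (by simp) (by simp) ?_ line.toList hmem c hc
  intro d hd hb
  refine pv_char_class d ?_ hb
  unfold pvDomStr at hdom
  exact List.all_eq_true.mp hdom d hd

-- ---------- the scanner computes split₀ ∘ strip on each kept line ----------

-- end-of-line flush, as Source B performs it
def pvFlush (st : List String × List Char × Bool × Bool) : List String :=
  if st.2.1 ≠ [] ∧ st.2.2.1 = false then st.1 ++ [String.ofList st.2.1] else st.1

theorem pv_machine_comment (l : List Char) :
    ∀ toks cur, ∃ cur', l.foldl pvStep (toks, cur, true, true) = (toks, cur', true, true) := by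
  induction l with
  | nil => intro toks cur; exact ⟨cur, rfl⟩
  | cons c l ih =>
    intro toks cur
    simp only [List.foldl_cons, pvStep]
    by_cases h : c = ' ' ∨ c = '\t'
    · simpa [h] using ih toks []
    · simpa [h] using ih toks (cur ++ [c])

theorem pv_machine_go (l : List Char)
    (hchar : ∀ c ∈ l, (PySem.Chars.isspace c = true ↔ (c = ' ' ∨ c = '\t'))) :
    ∀ toks cur,
    pvFlush (l.foldl pvStep (toks, cur, false, true))
    = toks ++ (PySem.Chars.split₀.go l cur.reverse []).map String.ofList := by
  induction l with
  | nil =>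
    intro toks cur
    by_cases hcur : cur = [] <;>
      simp [pvFlush, PySem.Chars.split₀.go, hcur, List.isEmpty_iff]
  | cons c l ih =>
    intro toks cur
    have hc := hchar c (by simp)
    have hchar' : ∀ c ∈ l, (PySem.Chars.isspace c = true ↔ (c = ' ' ∨ c = '\t')) :=
      fun d hd => hchar d (by simp [hd])
    by_cases hws : c = ' ' ∨ c = '\t'
    · have hsp : PySem.Chars.isspace c = true := hc.mpr hws
      have hstep : pvStep (toks, cur, false, true) c
          = ((if cur ≠ [] then toks ++ [String.ofList cur] else toks), [], false, true) := by
        simp [pvStep, hws]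
      have hgo : PySem.Chars.split₀.go (c :: l) cur.reverse []
          = (if cur ≠ [] then [cur] else []) ++ PySem.Chars.split₀.go l [] [] := by
        by_cases hcur : cur = []
        · subst hcur; simp [PySem.Chars.split₀.go, hsp]
        · simp only [PySem.Chars.split₀.go, hsp, if_true]
          rw [if_neg (by simp [List.isEmpty_iff, hcur])]
          rw [List.reverse_reverse, pv_go_acc l [] [cur]]
          simp [hcur]
      rw [List.foldl_cons, hstep, ih hchar' _ [], hgo]
      by_cases hcur : cur = [] <;> simp [hcur]
    · have hsp : PySem.Chars.isspace c = false := by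
        cases h : PySem.Chars.isspace c
        · rfl
        · exact absurd (hc.mp h) hws
      have hstep : pvStep (toks, cur, false, true) c = (toks, cur ++ [c], false, true) := by
        simp [pvStep, hws]
      have hgo : PySem.Chars.split₀.go (c :: l) cur.reverse []
          = PySem.Chars.split₀.go l (cur ++ [c]).reverse [] := by
        simp [PySem.Chars.split₀.go, hsp]
      rw [List.foldl_cons, hstep, ih hchar' _ _, hgo]

theorem pv_machine_line (l : List Char)
    (hchar : ∀ c ∈ l, (PySem.Chars.isspace c = true ↔ (c = ' ' ∨ c = '\t'))) :
    ∀ toks,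
    pvFlush (l.foldl pvStep (toks, [], false, false))
    = toks ++ (if PySem.Chars.strip l ≠ [] ∧
                  PySem.Chars.startswith (PySem.Chars.strip l) ['#'] = false
               then (PySem.Chars.split₀ (PySem.Chars.strip l)).map String.ofList else []) := by
  induction l with
  | nil => intro toks; simp [pvFlush, PySem.Chars.strip, PySem.Chars.lstrip, PySem.Chars.rstrip]
  | cons c l ih =>
    intro toks
    have hc := hchar c (by simp)
    have hchar' : ∀ c ∈ l, (PySem.Chars.isspace c = true ↔ (c = ' ' ∨ c = '\t')) :=
      fun d hd => hchar d (by simp [hd])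
    by_cases hws : c = ' ' ∨ c = '\t'
    · have hsp : PySem.Chars.isspace c = true := hc.mpr hws
      have hstep : pvStep (toks, [], false, false) c = (toks, [], false, false) := by
        simp [pvStep, hws]

      rw [List.foldl_cons, hstep, ih hchar' toks, pv_strip_cons_ws c l hsp]
    · have hsp : PySem.Chars.isspace c = false := by
        cases h : PySem.Chars.isspace c
        · rfl
        · exact absurd (hc.mp h) hws
      rw [pv_strip_cons_nonws c l hsp]
      by_cases hcm : c = '#'
      · subst hcm
        have hstep : pvStep (toks, [], false, false) '#' = (toks, ['#'], true, true) := by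
          simp [pvStep, hws]
        obtain ⟨cur', hst⟩ := pv_machine_comment l toks ['#']
        rw [List.foldl_cons, hstep, hst]
        have hpre : PySem.Chars.startswith ('#' :: PySem.Chars.rstrip l) ['#'] = true := by
          simp [PySem.Chars.startswith, List.isPrefixOf]
        rw [if_neg (by simp [hpre])]
        simp [pvFlush]
      · have hstep : pvStep (toks, [], false, false) c = (toks, [c], false, true) := by
          simp [pvStep, hws, hcm]
        rw [List.foldl_cons, hstep, pv_machine_go l hchar' toks [c]]
        have hpre : PySem.Chars.startswith (c :: PySem.Chars.rstrip l) ['#'] = false := by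
          simp only [PySem.Chars.startswith, List.isPrefixOf, Bool.and_eq_false_iff, beq_eq_false_iff_ne]
          exact Or.inl (fun h => hcm h.symm)
        rw [if_pos ⟨by simp, hpre⟩]
        have : PySem.Chars.split₀ (c :: PySem.Chars.rstrip l)
            = PySem.Chars.split₀.go l [c] [] := by
          simp only [PySem.Chars.split₀, PySem.Chars.split₀.go, hsp]
          simp [pv_go_rstrip]
        rw [this]
        simp

-- ---------- assembling the token lists ----------


theorem pv_foldl_lines {α : Type} (g : α → List String) :
    ∀ (lines : List α) (f : List String → α → List String) (acc : List String),
    (∀ line ∈ lines, ∀ toks, f toks line = toks ++ g line) →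
    lines.foldl f acc = acc ++ lines.flatMap g := by
  intro lines
  induction lines with
  | nil => intro f acc _; simp
  | cons x xs ih =>
    intro f acc h
    simp only [List.foldl_cons, List.flatMap_cons]
    rw [h x (by simp), ih f _ (fun l hl => h l (by simp [hl]))]
    simp

theorem pv_flatMap_filter {α β : Type} (q : α → Bool) (f : α → List β) (l : List α) :
    (l.filter q).flatMap f = l.flatMap (fun x => if q x = true then f x else []) := by
  induction l with
  | nil => rfl
  | cons x xs ih =>
    by_cases h : q x = true <;> simp [h, ih]

theorem pv_tokens_eq (text : String) (hdom : pvDomStr text = true) :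
    ((PySem.Str.splitlines text).foldl
      (fun toks line =>
        let st := line.toList.foldl pvStep (toks, [], false, false)
        if st.2.1 ≠ [] ∧ st.2.2.1 = false then st.1 ++ [String.ofList st.2.1] else st.1) [])
    = PySem.Str.split₀ (PySem.Str.join " "
        ((PySem.Str.splitlines text).foldl
          (fun acc line =>
            let stripped := PySem.Str.strip line
            if stripped = "" ∨ PySem.Str.startswith stripped "#" = true then acc
            else acc ++ [stripped]) [])) := by
  have hline := pv_line_chars text hdom
  -- the scanner side: one flatMap over the lines
  have hB : ((PySem.Str.splitlines text).foldl
      (fun toks line =>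
        let st := line.toList.foldl pvStep (toks, [], false, false)
        if st.2.1 ≠ [] ∧ st.2.2.1 = false then st.1 ++ [String.ofList st.2.1] else st.1) [])
      = (PySem.Str.splitlines text).flatMap
          (fun line => if PySem.Str.strip line ≠ "" ∧
                          PySem.Str.startswith (PySem.Str.strip line) "#" = false
                       then PySem.Str.split₀ (PySem.Str.strip line) else []) := by
    refine (pv_foldl_lines
      (fun line => if PySem.Str.strip line ≠ "" ∧
                      PySem.Str.startswith (PySem.Str.strip line) "#" = false
                   then PySem.Str.split₀ (PySem.Str.strip line) else [])
      (PySem.Str.splitlines text) _ [] ?_).trans (by simp)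
    intro line hmem toks
    show pvFlush (line.toList.foldl pvStep (toks, [], false, false)) = _
    rw [pv_machine_line line.toList (hline line hmem) toks]
    congr 1
    show _ = (if PySem.Str.strip line ≠ "" ∧
                 PySem.Str.startswith (PySem.Str.strip line) "#" = false
              then PySem.Str.split₀ (PySem.Str.strip line) else [])
    have h1 : (PySem.Str.strip line = "") ↔ (PySem.Chars.strip line.toList = []) := by
      rw [← String.toList_inj, PySem.Str.toList_strip]
      exact Iff.rfl
    have h2 : PySem.Str.startswith (PySem.Str.strip line) "#"
        = PySem.Chars.startswith (PySem.Chars.strip line.toList) ['#'] := by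
      rw [PySem.Str.startswith_eq, PySem.Str.toList_strip]
      rfl
    have h3 : PySem.Str.split₀ (PySem.Str.strip line)
        = (PySem.Chars.split₀ (PySem.Chars.strip line.toList)).map String.ofList := by
      simp only [PySem.Str.split₀, PySem.Str.toList_strip]
    split_ifs with hA hS hS
    · exact h3.symm
    · refine absurd (And.intro (fun h => hA.1 (h1.mp h)) ?_) hS
      rw [h2]; exact hA.2
    · refine absurd (And.intro (fun h => hS.1 (h1.mpr h)) ?_) hA
      rw [← h2]; exact hS.2
    · rfl
  rw [hB]
  -- the pipeline side: filter, map strip, join, split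
  have hA : (fun (acc : List String) (line : String) =>
        let stripped := PySem.Str.strip line
        if stripped = "" ∨ PySem.Str.startswith stripped "#" = true then acc
        else acc ++ [stripped])
      = (fun acc line =>
        if ¬(PySem.Str.strip line = "" ∨ PySem.Str.startswith (PySem.Str.strip line) "#" = true)
        then acc ++ [PySem.Str.strip line] else acc) := by
    funext acc line
    show (if PySem.Str.strip line = "" ∨ PySem.Str.startswith (PySem.Str.strip line) "#" = true
          then acc else acc ++ [PySem.Str.strip line]) = _
    split_ifs with h1 h2 <;> rfl
  rw [hA, PySem.List.foldl_append_ite, pv_str_join_split, List.nil_append, List.flatMap_map,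
      pv_flatMap_filter]
  refine List.flatMap_congr ?_
  intro line hmem
  by_cases hs : PySem.Str.strip line = "" <;>
    by_cases hw : PySem.Str.startswith (PySem.Str.strip line) "#" = true <;>
      simp [hs]

theorem pv_main (words : Int) (TA TB : List String) (hEq : TA = TB)
    (hgood : ∀ t ∈ TA, t.toList ≠ [] ∧ ∀ c ∈ t.toList, PySem.Chars.isspace c = false) :
    (if (TA.length : Int) ≤ words then PySem.Str.join " " TA
     else PySem.Str.rstrip (PySem.Str.join " " (PySem.List.slice TA none (some words))) ++ "...")
    = (if (TB.length : Int) ≤ words then PySem.Str.join " " TB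
       else PySem.Str.join " " (PySem.List.slice TB none (some words)) ++ "...") := by
  subst hEq
  split_ifs with h
  · rfl
  · exact congrArg (fun z => z ++ "...")
      (pv_str_rstrip_join _ (fun t ht => hgood t (PySem.List.mem_of_mem_slice TA none (some words) ht)))

-- ===== VERDICT (by name: the statement is the Claim_ definition above) =====
theorem excerpt_spec : Claim_equal_excerpt := by
  intro text words hdom
  have hds : pvDomStr text = true := by
    unfold Dom_excerpt at hdom
    exact (Bool.and_eq_true_iff.mp hdom).1
  show excerpt text words = excerpt_alt text words
  unfold excerpt excerpt_alt
  simp only []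
  rw [pv_tokens_eq text hds]
  exact pv_main words _ _ rfl (fun t ht => pv_str_tok_good _ t ht)
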